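-- pv_equiv track=rewrite | github.com/EgorPlekhanov/Python-HSE | Lab1.py | removeRepeatingSymbols
-- ===== SOURCE A (Python) =====
-- def removeRepeatingSymbols(text):
--     result = ""
--     str = []
--     lastSymbol = ""
--     for word in text.split(' '):
--         for symbol in word:
--             if (symbol not in str or symbol != lastSymbol):
--                 str.append(symbol)
--                 lastSymbol = symbol
--         result += "".join(str) + " "
--         str = []
--     return result
-- ===== SOURCE B (Python) =====
-- def removeRepeatingSymbols(text):
--     out = []
--     prev = None
--     for c in text:
--         if c == ' ':
--             out.append(' ')
--             prev = None
--         elif c != prev: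
--             out.append(c)
--             prev = c
--     out.append(' ')
--     return ''.join(out)
-- ===== Notes on version B (the rewrite author's own statement) =====
-- stated objective: faster
-- what changed: Replaces A's split-into-words with nested per-word loops, per-symbol membership rescans of the kept-characters list and repeated string concatenation by a single linear pass over the characters that keeps only the previous non-space character and emits spaces literally, appending one final space; intended as faster (timing runs measured between 1.4x and 2.4x depending on input family).
import Mathlib
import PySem

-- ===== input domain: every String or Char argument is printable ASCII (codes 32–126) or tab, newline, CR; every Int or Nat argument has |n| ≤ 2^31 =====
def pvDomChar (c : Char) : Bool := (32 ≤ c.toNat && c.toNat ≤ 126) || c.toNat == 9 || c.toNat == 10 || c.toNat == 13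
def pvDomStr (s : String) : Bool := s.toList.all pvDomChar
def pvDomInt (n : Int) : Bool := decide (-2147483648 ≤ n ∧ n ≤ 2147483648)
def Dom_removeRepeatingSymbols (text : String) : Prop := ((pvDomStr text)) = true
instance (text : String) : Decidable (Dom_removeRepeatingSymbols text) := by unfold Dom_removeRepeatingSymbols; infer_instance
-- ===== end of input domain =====

-- B replaces A's nested split/word/membership scans by one linear pass over the characters; intended as faster (timing runs measured 1.4-2.4x).

-- ===== PORT A =====
-- inner loop body of A: state = (str, lastSymbol); lastSymbol "" is modelled as [].
def pvAStep (p : List Char × List Char) (symbol : Char) : List Char × List Char :=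
  if symbol ∉ p.1 ∨ ¬ ([symbol] = p.2) then (p.1 ++ [symbol], [symbol]) else p

-- one iteration of A's outer loop: state = (result, lastSymbol); str resets to [] per word.
def pvAWord (st : List Char × List Char) (word : List Char) : List Char × List Char :=
  let r := word.foldl pvAStep ([], st.2)
  (st.1 ++ r.1 ++ [' '], r.2)

def removeRepeatingSymbols (text : String) : String :=
  String.mk ((PySem.Chars.splitOn text.toList [' ']).foldl pvAWord ([], [])).1

-- ===== PORT B =====
def pvBStep (p : List Char × Option Char) (c : Char) : List Char × Option Char :=
  if c = ' ' then (p.1 ++ [' '], none)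
  else if ¬ (some c = p.2) then (p.1 ++ [c], some c) else p

def removeRepeatingSymbols_alt (text : String) : String :=
  String.mk ((text.toList.foldl pvBStep ([], none)).1 ++ [' '])

-- ===== PRECONDITION & SPEC =====
def Spec_removeRepeatingSymbols (text : String) (out : String) : Prop := out = removeRepeatingSymbols_alt text
instance (text : String) (out : String) : Decidable (Spec_removeRepeatingSymbols text out) := by unfold Spec_removeRepeatingSymbols; infer_instance

-- ===== CLAIM (what is proved, stated in full; the proofs are below) =====
def Claim_equal_removeRepeatingSymbols : Prop := ∀ (text : String), Dom_removeRepeatingSymbols text → Spec_removeRepeatingSymbols text (removeRepeatingSymbols text)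

-- ===== LEMMAS AND PROOFS =====

-- run-collapsing of a word, the common value both sides compute
def pvCollapseAux (p : Char) : List Char → List Char
  | [] => []
  | c :: r => if c = p then pvCollapseAux p r else c :: pvCollapseAux c r

def pvCollapse : List Char → List Char
  | [] => []
  | c :: r => c :: pvCollapseAux c r

theorem pvCollapse_nil : pvCollapse [] = [] := rfl
-- split on a single space, simple structural version
def pvSplit : List Char → List (List Char)
  | [] => [[]]
  | c :: r =>
    if c = ' ' then [] :: pvSplit r
    else match pvSplit r with
      | [] => [[c]]
      | w :: ws => (c :: w) :: ws

def pvModHead (pre : List Char) : List (List Char) → List (List Char)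
  | [] => []
  | w :: ws => (pre ++ w) :: ws

theorem pvSplit_ne_nil (l : List Char) : pvSplit l ≠ [] := by
  cases l with
  | nil => simp [pvSplit]
  | cons c r =>
    simp only [pvSplit]
    split
    · simp
    · split <;> simp

theorem pvGo_eq (fuel : Nat) : ∀ (l cur : List Char) (acc : List (List Char)),
    l.length ≤ fuel →
    PySem.Chars.splitOn.go [' '] fuel l cur acc
      = acc.reverse ++ pvModHead cur.reverse (pvSplit l) := by
  induction fuel with
  | zero =>
    intro l cur acc h
    have hl : l = [] := by cases l <;> simp_all
    subst hl
    simp [PySem.Chars.splitOn.go, pvSplit, pvModHead]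
  | succ fuel ih =>
    intro l cur acc h
    cases l with
    | nil => simp [PySem.Chars.splitOn.go, pvSplit, pvModHead]
    | cons c rest =>
      rw [PySem.Chars.splitOn.go]
      by_cases hc : c = ' '
      · subst hc
        have hpre : [' '].isPrefixOf (' ' :: rest) = true := by
          simp [List.isPrefixOf]
        simp only [hpre, List.length_nil, Nat.zero_add, List.drop_succ_cons, List.drop_zero,
          if_true, List.length_cons] at *
        rw [ih rest [] (cur.reverse :: acc) (by omega)]
        cases hws : pvSplit rest with
        | nil => exact absurd hws (pvSplit_ne_nil rest)
        | cons w ws => simp [pvSplit, hws, pvModHead]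
      · have hpre : [' '].isPrefixOf (c :: rest) = false := by
          simp [List.isPrefixOf]
          intro h'; exact absurd h'.symm hc
        simp only [hpre, Bool.false_eq_true, if_false]
        rw [ih rest (c :: cur) acc (by simp at h; omega)]
        cases hws : pvSplit rest with
        | nil => exact absurd hws (pvSplit_ne_nil rest)
        | cons w ws =>
          simp [pvSplit, hws, hc, pvModHead]

theorem pvSplitOn_eq (cs : List Char) : PySem.Chars.splitOn cs [' '] = pvSplit cs := by
  rw [PySem.Chars.splitOn, pvGo_eq (cs.length + 1) cs [] [] (by omega)]
  cases hws : pvSplit cs with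
  | nil => exact absurd hws (pvSplit_ne_nil cs)
  | cons w ws => simp [pvModHead]

-- A's inner loop with a nonempty str whose last appended char is p
theorem pvA_inner (word : List Char) : ∀ (str : List Char) (p : Char), p ∈ str →
    word.foldl pvAStep (str, [p]) = (str ++ pvCollapseAux p word, [word.getLastD p]) := by
  induction word with
  | nil => intro str p _; simp [pvCollapseAux]
  | cons c rest ih =>
    intro str p hp
    by_cases hc : c = p
    · subst hc
      have : pvAStep (str, [c]) c = (str, [c]) := by
        simp [pvAStep, hp]
      simp only [List.foldl_cons, this, pvCollapseAux]
      rw [ih str c hp]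
      cases rest <;> simp [List.getLastD]
    · have : pvAStep (str, [p]) c = (str ++ [c], [c]) := by
        simp [pvAStep, hc]
      simp only [List.foldl_cons, this, pvCollapseAux, if_neg hc]
      rw [ih (str ++ [c]) c (by simp)]
      cases rest <;> simp [List.getLastD]

-- A's per-word processing: str result is the collapsed word, independent of incoming lastSymbol
theorem pvA_word (word : List Char) (last : List Char) :
    (word.foldl pvAStep ([], last)).1 = pvCollapse word := by
  cases word with
  | nil => simp [pvCollapse]
  | cons c rest =>
    have h1 : pvAStep ([], last) c = ([c], [c]) := by
      simp [pvAStep]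
    simp only [List.foldl_cons, h1]
    rw [pvA_inner rest [c] c (by simp)]
    simp [pvCollapse]

-- A's outer loop accumulates collapsed words each followed by a space
theorem pvA_outer (words : List (List Char)) : ∀ (res last : List Char),
    (words.foldl pvAWord (res, last)).1
      = res ++ words.flatMap (fun w => pvCollapse w ++ [' ']) := by
  induction words with
  | nil => intro res last; simp
  | cons w ws ih =>
    intro res last
    simp only [List.foldl_cons, pvAWord]
    rw [ih]
    rw [pvA_word w last]
    simp

-- B's fold, recursion form
def pvBRun : List Char → Option Char → List Char
  | [], _ => []
  | c :: r, prev =>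
    if c = ' ' then ' ' :: pvBRun r none
    else if ¬ (some c = prev) then c :: pvBRun r (some c) else pvBRun r prev

theorem pvB_fold (cs : List Char) : ∀ (out : List Char) (prev : Option Char),
    (cs.foldl pvBStep (out, prev)).1 = out ++ pvBRun cs prev := by
  induction cs with
  | nil => intro out prev; simp [pvBRun]
  | cons c r ih =>
    intro out prev
    simp only [List.foldl_cons, pvBStep, pvBRun]
    by_cases hc : c = ' '
    · simp [hc, ih]
    · by_cases hp : some c = prev
      · simp [hc, hp, ih]
      · simp [hc, hp, ih]

def pvJ (ws : List (List Char)) : List Char := ws.flatMap (fun w => pvCollapse w ++ [' '])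

-- the crossing lemma: B's single pass equals flattened per-word collapsing
theorem pvCross (cs : List Char) :
    (pvBRun cs none ++ [' '] = pvJ (pvSplit cs)) ∧
    (∀ p, pvBRun cs (some p) ++ [' ']
        = pvCollapseAux p (pvSplit cs).headI ++ [' '] ++ pvJ (pvSplit cs).tail) := by
  induction cs with
  | nil =>
    constructor
    · simp [pvBRun, pvSplit, pvJ, pvCollapse]
    · intro p; simp [pvBRun, pvSplit, pvCollapseAux, pvJ]
  | cons c r ih =>
    obtain ⟨iha, ihb⟩ := ih
    by_cases hc : c = ' '
    · subst hc
      have hs : pvSplit (' ' :: r) = [] :: pvSplit r := by simp [pvSplit]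
      constructor
      · simp only [pvBRun, hs, pvJ, List.flatMap_cons, pvCollapse_nil]
        simp only [pvJ] at iha
        simp [iha]
      · intro p
        simp only [pvBRun, hs, pvCollapseAux, List.headI, List.tail_cons]
        simp only [pvJ] at iha ⊢
        simp [iha]
    · cases hws : pvSplit r with
      | nil => exact absurd hws (pvSplit_ne_nil r)
      | cons w ws =>
        have hs : pvSplit (c :: r) = (c :: w) :: ws := by
          simp [pvSplit, hc, hws]
        constructor
        · simp only [pvBRun, if_neg hc, Option.some_ne_none, not_false_iff, if_pos, hs, pvJ,
            List.flatMap_cons, pvCollapse]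
          have := ihb c
          simp only [hws, List.headI, List.tail_cons, pvJ] at this
          simp [this]
          rfl
        · intro p
          by_cases hp : c = p
          · subst hp
            have hb : pvBRun (c :: r) (some c) = pvBRun r (some c) := by
              simp [pvBRun, hc]
            rw [hb]
            have := ihb c
            simp only [hws, List.headI, List.tail_cons] at this
            simp only [hs, List.headI, List.tail_cons, pvCollapseAux]
            exact this
          · have hb : pvBRun (c :: r) (some p) = c :: pvBRun r (some c) := by
              simp [pvBRun, hc]
              intro h; exact absurd h hp
            rw [hb]
            have := ihb c
            simp only [hws, List.headI, List.tail_cons] at this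
            simp only [hs, List.headI, List.tail_cons, pvCollapseAux]
            rw [if_neg (by exact fun h => hp h)]
            simp [this]

-- ===== VERDICT (by name: the statement is the Claim_ definition above) =====
theorem removeRepeatingSymbols_spec : Claim_equal_removeRepeatingSymbols := by
  intro text _
  show removeRepeatingSymbols text = removeRepeatingSymbols_alt text
  unfold removeRepeatingSymbols removeRepeatingSymbols_alt
  rw [pvSplitOn_eq, pvA_outer, pvB_fold]
  simp only [List.nil_append]
  rw [(pvCross text.toList).1]
  rfl
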